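-- pv_equiv track=rewrite | github.com/pypi-data/pypi-mirror-55 | packages/bomail/bomail-0.9.4.1.tar.gz/bomail-0.9.4.1/bomail/util/addr.py | get_first_pr_from_quoted
-- ===== SOURCE A (Python) =====
-- def get_first_addr_from_nodisp(addr_str):
--   if "@" not in addr_str:
--     return None, None  # no idea what to do
--   at_ind = addr_str.index("@")
--   end_ind = at_ind + 1
--   while end_ind < len(addr_str) and addr_str[end_ind] not in [' ', ',']:
--     end_ind += 1
--   mypart = addr_str[:end_ind].strip()
--   if len(mypart) >= 1 and mypart[0] == "<":
--     mypart = mypart[1:]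
--   if len(mypart) >= 1 and mypart[-1] == ">":
--     mypart = mypart[:-1]
--   return mypart, end_ind
--
-- def get_first_pr_from_quoted(addr_str):
--   if len(addr_str) <= 0 or addr_str[0] != '"':
--     return None, None
--   i = 1
--   while i < len(addr_str) and addr_str[i] != '"':
--     if addr_str[i] == "\\":
--       i += 2
--     else:
--       i += 1
--   if i >= len(addr_str):
--     return None, None  # no address part!
--   disp_name = addr_str[1:i].strip()
--   addr_start = i+1
--   addr_part, an_end_ind = get_first_addr_from_nodisp(addr_str[addr_start:])
--   if addr_part is None:
--     return None, None
--   return [disp_name, addr_part], addr_start + an_end_ind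
-- ===== SOURCE B (Python) =====
-- def _close_quote(s, j):
--   # index of the first '"' at position >= j that is preceded by an even-length
--   # run of backslashes, or None if there is none reachable
--   d = s[j:].find('"')
--   if d == -1:
--     return None
--   q = j + d
--   k = 0
--   while q - 1 - k >= 1 and s[q - 1 - k] == '\\':
--     k += 1
--   if k % 2 == 0:
--     return q
--   return _close_quote(s, q + 1)
--
-- def get_first_pr_from_quoted(addr_str):
--   if not addr_str.startswith('"'):
--     return None, None
--   j = _close_quote(addr_str, 1)
--   if j is None:
--     return None, None
--   disp_name = addr_str[1:j].strip()
--   rest = addr_str[j + 1:]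
--   at = rest.find('@')
--   if at == -1:
--     return None, None
--   stops = [p for p in (rest.find(' ', at + 1), rest.find(',', at + 1)) if p != -1]
--   end = min(stops) if stops else len(rest)
--   part = rest[:end].strip()
--   if part.startswith('<'):
--     part = part[1:]
--   if part.endswith('>'):
--     part = part[:-1]
--   return [disp_name, part], j + 1 + end
-- ===== Notes on version B (the rewrite author's own statement) =====
-- stated objective: alternative
-- what changed: A's forward escape-pair-skipping while-loop over indices is replaced by repeated find() for the next quote plus a backslash-run parity check, and the helper's character-by-character end scan is replaced by the minimum of two find() calls for the separator characters.
import Mathlib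
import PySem

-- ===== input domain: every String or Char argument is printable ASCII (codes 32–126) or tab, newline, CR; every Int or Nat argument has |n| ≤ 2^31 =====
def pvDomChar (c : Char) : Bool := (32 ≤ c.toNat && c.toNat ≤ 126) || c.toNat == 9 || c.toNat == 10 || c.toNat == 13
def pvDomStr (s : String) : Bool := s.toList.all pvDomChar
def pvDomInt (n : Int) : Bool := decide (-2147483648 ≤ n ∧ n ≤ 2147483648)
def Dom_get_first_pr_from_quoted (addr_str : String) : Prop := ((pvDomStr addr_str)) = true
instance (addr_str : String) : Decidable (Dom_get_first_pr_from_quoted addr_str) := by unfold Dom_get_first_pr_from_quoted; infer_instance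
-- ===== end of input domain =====

-- B replaces A's forward escape-pair-skipping scan by find-based search for the first quote
-- preceded by an even backslash run, and the helper's char-by-char end scan by the minimum of
-- two find() calls (objective: idiomatic / alternative decomposition; return value only).

-- ===== PORT A =====
-- while i < len and s[i] != '"': i += 2 if s[i] == '\\' else 1
def pvScanA (l : List Char) (i : Nat) : Nat :=
  if h : i < l.length then
    if l[i] = '"' then i
    else if l[i] = '\\' then pvScanA l (i + 2)
    else pvScanA l (i + 1)
  else i
termination_by l.length - i

-- while end_ind < len and s[end_ind] not in [' ', ',']: end_ind += 1
def pvNodispScanA (l : List Char) (e : Nat) : Nat :=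
  if h : e < l.length then
    if l[e] = ' ' ∨ l[e] = ',' then e else pvNodispScanA l (e + 1)
  else e
termination_by l.length - e

-- get_first_addr_from_nodisp (A's helper), on the char list of its argument
def pvNodispA (l : List Char) : Option String × Option Int :=
  if PySem.Chars.isIn ['@'] l = false then (none, none)
  else
    let at_ind : Nat := (PySem.Chars.find l ['@']).toNat
    let end_ind : Nat := pvNodispScanA l (at_ind + 1)
    let m0 := PySem.Chars.strip (PySem.List.slice l none (some (end_ind : Int)))
    let m1 := if 1 ≤ m0.length ∧ m0.getD 0 ' ' = '<' then m0.drop 1 else m0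
    let m2 := if 1 ≤ m1.length ∧ m1.getLastD ' ' = '>' then m1.dropLast else m1
    (some (String.ofList m2), some (end_ind : Int))

def get_first_pr_from_quoted (addr_str : String) : Option (List String) × Option Int :=
  let l := addr_str.toList
  if l.length ≤ 0 ∨ PySem.List.pyGet? l 0 ≠ some '"' then (none, none)
  else
    let i := pvScanA l 1
    if l.length ≤ i then (none, none)
    else
      let disp := String.ofList (PySem.Chars.strip (PySem.List.slice l (some 1) (some (i : Int))))
      let addr_start := i + 1
      match pvNodispA (PySem.List.slice l (some (addr_start : Int)) none) with
      | (some ap, some e) => (some [disp, ap], some ((addr_start : Int) + e))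
      | _ => (none, none)

-- ===== PORT B =====
-- k = 0; while q - 1 - k >= 1 and s[q - 1 - k] == '\\': k += 1   (backslash run before q)
def pvRunB (l : List Char) (q k : Nat) : Nat :=
  if h : k + 1 < q then
    if l.getD (q - 1 - k) ' ' = '\\' then pvRunB l q (k + 1) else k
  else k
termination_by q - k

-- _close_quote: first '"' at index ≥ j preceded by an even backslash run
def pvCloseB (l : List Char) (j : Nat) : Option Nat :=
  let d := PySem.Chars.find (l.drop j) ['"']
  if hd : d = -1 then none
  else
    let q := j + d.toNat
    if pvRunB l q 0 % 2 = 0 then some q else pvCloseB l (q + 1)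
termination_by l.length - j
decreasing_by
  have h0 : 0 ≤ PySem.Chars.find (l.drop j) ['"'] := by
    rcases (PySem.Chars.neg_one_le_find (l.drop j) ['"']).lt_or_eq with h | h
    · omega
    · exact absurd h.symm hd
  have h1 := PySem.Chars.find_le_length (l.drop j) ['"']
  have h2 := (PySem.Chars.find_spec h0).1
  have h3 : (PySem.Chars.find (l.drop j) ['"']).toNat < (l.drop j).length := by
    by_contra hcon
    rw [List.drop_eq_nil_of_le (by omega), List.prefix_nil] at h2
    simp at h2
  simp only [List.length_drop] at h3
  omega

def get_first_pr_from_quoted_alt (addr_str : String) : Option (List String) × Option Int :=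
  let l := addr_str.toList
  if PySem.Chars.startswith l ['"'] = false then (none, none)
  else
    match pvCloseB l 1 with
    | none => (none, none)
    | some j =>
      let disp := String.ofList (PySem.Chars.strip (PySem.List.slice l (some 1) (some (j : Int))))
      let rest := PySem.List.slice l (some ((j : Int) + 1)) none
      let a := PySem.Chars.find rest ['@']
      if a = -1 then (none, none)
      else
        let f1 := PySem.Chars.findFrom rest [' '] (a + 1) none
        let f2 := PySem.Chars.findFrom rest [','] (a + 1) none
        let stops := (if f1 = -1 then [] else [f1]) ++ (if f2 = -1 then [] else [f2])
        let endI : Int := (match PySem.List.min? stops id with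
          | some m => m
          | none => (rest.length : Int))
        let part0 := PySem.Chars.strip (PySem.List.slice rest none (some endI))
        let part1 := if PySem.Chars.startswith part0 ['<'] then part0.drop 1 else part0
        let part2 := if PySem.Chars.endswith part1 ['>'] then part1.dropLast else part1
        (some [disp, String.ofList part2], some ((j : Int) + 1 + endI))

-- ===== PRECONDITION & SPEC =====
def Spec_get_first_pr_from_quoted (addr_str : String) (out : Option (List String) × Option Int) : Prop := out = get_first_pr_from_quoted_alt addr_str
instance (addr_str : String) (out : Option (List String) × Option Int) : Decidable (Spec_get_first_pr_from_quoted addr_str out) := by unfold Spec_get_first_pr_from_quoted; infer_instance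

-- ===== CLAIM (what is proved, stated in full; the proofs are below) =====
def Claim_equal_get_first_pr_from_quoted : Prop := ∀ (addr_str : String), Dom_get_first_pr_from_quoted addr_str → Spec_get_first_pr_from_quoted addr_str (get_first_pr_from_quoted addr_str)

-- ===== LEMMAS AND PROOFS =====

-- the maximal run of backslashes ending at position p (positions ≥ 1 only)
def pvCnt (l : List Char) (p : Nat) : Nat :=
  if 1 ≤ p ∧ l.getD p ' ' = '\\' then pvCnt l (p - 1) + 1 else 0
termination_by p
decreasing_by omega

theorem pvRunB_eq (l : List Char) (q k : Nat) : pvRunB l q k = k + pvCnt l (q - 1 - k) := by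
  induction k using pvRunB.induct (l := l) (q := q) with
  | case1 k h hbs ih =>
    rw [pvRunB, pvCnt, dif_pos h, if_pos hbs, ih, if_pos ⟨by omega, hbs⟩]
    have h2 : q - 1 - (k + 1) = q - 1 - k - 1 := by omega
    rw [h2]
    omega
  | case2 k h hbs =>
    rw [pvRunB, pvCnt, dif_pos h, if_neg hbs, if_neg]
    · simp
    · rintro ⟨-, h2⟩; exact hbs h2
  | case3 k h =>
    rw [pvRunB, pvCnt, dif_neg h, if_neg]
    · simp
    · rintro ⟨h1, -⟩; omega

theorem pv_prefix_singleton {c : Char} {xs : List Char} : [c] <+: xs ↔ xs.head? = some c := by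
  constructor
  · rintro ⟨t, rfl⟩; rfl
  · intro h
    cases xs with
    | nil => simp at h
    | cons x t => simp at h; exact ⟨t, by simp [h]⟩

theorem pv_suffix_singleton {c : Char} {xs : List Char} : [c] <:+ xs ↔ xs.getLast? = some c := by
  rw [← List.reverse_prefix, ← List.head?_reverse]
  simp only [List.reverse_singleton]
  exact pv_prefix_singleton

theorem pv_infix_singleton {c : Char} {xs : List Char} : [c] <:+: xs ↔ c ∈ xs := by
  constructor
  · intro h; exact h.subset (by simp)
  · intro h
    rcases List.append_of_mem h with ⟨s1, t1, rfl⟩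
    exact ⟨s1, t1, by simp⟩

theorem pv_find_neg {c : Char} {xs : List Char} (hc : c ∉ xs) : PySem.Chars.find xs [c] = -1 := by
  rw [PySem.Chars.find_eq_neg_one_iff, pv_infix_singleton]
  exact hc

theorem pv_find_mem {c : Char} {xs : List Char} (hc : c ∈ xs) :
    PySem.Chars.find xs [c] = ((xs.findIdx (· == c) : Nat) : Int) := by
  have h0 : 0 ≤ PySem.Chars.find xs [c] := by
    rw [PySem.Chars.find_nonneg_iff, pv_infix_singleton]; exact hc
  obtain ⟨hpre, hmin⟩ := PySem.Chars.find_spec h0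
  set t := (PySem.Chars.find xs [c]).toNat with ht
  have hget : xs[t]? = some c := by
    rw [← List.head?_drop]; exact pv_prefix_singleton.mp hpre
  have htlt : t < xs.length := by
    by_contra hcon
    rw [List.getElem?_eq_none (by omega)] at hget
    exact absurd hget (by simp)
  have hidx : xs.findIdx (· == c) = t := by
    rw [List.findIdx_eq htlt]
    constructor
    · simp [List.getElem?_eq_getElem htlt] at hget; simp [hget]
    · intro j hj
      have := hmin j hj
      rw [pv_prefix_singleton, List.head?_drop] at this
      simp only [List.getElem?_eq_getElem (by omega : j < xs.length)] at this
      simp only [beq_eq_false_iff_ne]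
      intro hx; exact this (by rw [hx])
  rw [hidx, ht]
  omega

theorem pv_scanA_end (l : List Char) (e : Nat) :
    pvNodispScanA l e = e + (l.drop e).findIdx (fun c => c == ' ' || c == ',') := by
  induction e using pvNodispScanA.induct (l := l) with
  | case1 e h hstop =>
    rw [pvNodispScanA, List.drop_eq_getElem_cons h]
    simp only [List.findIdx_cons]
    have : (l[e] == ' ' || l[e] == ',') = true := by
      rcases hstop with h' | h' <;> simp [h']
    simp [h, hstop, this]
  | case2 e h hstop ih =>
    rw [pvNodispScanA, List.drop_eq_getElem_cons h]
    simp only [List.findIdx_cons]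
    have : (l[e] == ' ' || l[e] == ',') = false := by
      push_neg at hstop
      simp [hstop.1, hstop.2]
    simp only [this, cond_false]
    simp [h, hstop, ih]
    omega
  | case3 e h =>
    rw [pvNodispScanA]
    simp at h
    simp [List.drop_eq_nil_of_le h, h]

theorem pv_findIdx_or (a b : Char) (l : List Char) :
    l.findIdx (fun c => c == a || c == b) = min (l.findIdx (· == a)) (l.findIdx (· == b)) := by
  induction l with
  | nil => simp
  | cons x t ih =>
    by_cases hxa : x = a
    · simp [List.findIdx_cons, hxa]
    · by_cases hxb : x = b
      · simp [List.findIdx_cons, hxa, hxb]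
      · have ha : (x == a) = false := by simp [hxa]
        have hb : (x == b) = false := by simp [hxb]
        simp only [List.findIdx_cons, ha, hb, Bool.or_false, cond_false, ih]
        omega

theorem pv_startswith_one (xs : List Char) (c : Char) :
    PySem.Chars.startswith xs [c] = true ↔ 1 ≤ xs.length ∧ xs.getD 0 ' ' = c := by
  rw [PySem.Chars.startswith_iff, pv_prefix_singleton]
  cases xs with
  | nil => simp
  | cons x t => simp [Nat.succ_le_succ]

theorem pv_endswith_one (xs : List Char) (c : Char) :
    PySem.Chars.endswith xs [c] = true ↔ 1 ≤ xs.length ∧ xs.getLastD ' ' = c := by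
  rw [PySem.Chars.endswith_iff, pv_suffix_singleton]
  rcases List.eq_nil_or_concat xs with rfl | ⟨t, x, rfl⟩
  · simp
  · simp [List.getLastD_eq_getLast?]

theorem pvCloseB_none (l : List Char) (i : Nat) (h : l.length ≤ i) : pvCloseB l i = none := by
  rw [pvCloseB]
  have : PySem.Chars.find (l.drop i) ['"'] = -1 := by
    rw [List.drop_eq_nil_of_le h]
    exact pv_find_neg (by simp)
  simp [this]

theorem pvCloseB_step (l : List Char) (i : Nat) (h : i < l.length) (hne : l[i] ≠ '"') :
    pvCloseB l i = pvCloseB l (i + 1) := by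
  have hd : l.drop i = l[i] :: l.drop (i + 1) := List.drop_eq_getElem_cons h
  by_cases hm : '"' ∈ l.drop (i + 1)
  · have hmem : '"' ∈ l.drop i := by rw [hd]; exact List.mem_cons_of_mem _ hm
    have hne' : (l[i] == '"') = false := by simp [hne]
    have hidx : (l.drop i).findIdx (· == '"') = (l.drop (i + 1)).findIdx (· == '"') + 1 := by
      rw [hd, List.findIdx_cons, hne']
      rfl
    conv_lhs => rw [pvCloseB]
    conv_rhs => rw [pvCloseB]
    rw [pv_find_mem hmem, pv_find_mem hm, hidx]
    simp only [Int.toNat_natCast]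
    have hfalse1 : ¬(((((l.drop (i+1)).findIdx (· == '"') + 1 : Nat)) : Int) = -1) := by omega
    have hfalse2 : ¬((((l.drop (i+1)).findIdx (· == '"') : Nat) : Int) = -1) := by omega
    rw [dif_neg hfalse1, dif_neg hfalse2]
    have hq : i + ((l.drop (i+1)).findIdx (· == '"') + 1) = i + 1 + (l.drop (i+1)).findIdx (· == '"') := by omega
    rw [hq]
  · have hm' : '"' ∉ l.drop i := by
      rw [hd]
      intro hx
      rcases List.mem_cons.mp hx with hx | hx
      · exact hne hx.symm
      · exact hm hx
    conv_lhs => rw [pvCloseB]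
    conv_rhs => rw [pvCloseB]
    rw [pv_find_neg hm', pv_find_neg hm]
    norm_num

theorem pvCloseB_quote (l : List Char) (i : Nat) (h : i < l.length) (hq : l[i] = '"') :
    pvCloseB l i = if pvRunB l i 0 % 2 = 0 then some i else pvCloseB l (i + 1) := by
  have hd : l.drop i = l[i] :: l.drop (i + 1) := List.drop_eq_getElem_cons h
  have hmem : '"' ∈ l.drop i := by rw [hd]; simp [hq]
  have hidx : (l.drop i).findIdx (· == '"') = 0 := by rw [hd]; simp [List.findIdx_cons, hq]
  conv_lhs => rw [pvCloseB]
  rw [pv_find_mem hmem, hidx]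
  norm_num

theorem pv_scan_close (l : List Char) (i : Nat) (h1 : 1 ≤ i) (hev : pvCnt l (i - 1) % 2 = 0) :
    pvCloseB l i = if pvScanA l i < l.length then some (pvScanA l i) else none := by
  revert h1 hev
  induction i using pvScanA.induct (l := l) with
  | case1 i h hq =>
    intro h1 hev
    have hscan : pvScanA l i = i := by rw [pvScanA, dif_pos h, if_pos hq]
    have hrun : pvRunB l i 0 % 2 = 0 := by rw [pvRunB_eq]; simpa using hev
    rw [pvCloseB_quote l i h hq, if_pos hrun, hscan, if_pos h]
  | case2 i h hq hbs ih =>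
    intro h1 hev
    have hscan : pvScanA l i = pvScanA l (i + 2) := by
      rw [pvScanA, dif_pos h, if_neg hq, if_pos hbs]
    have hstep : pvCloseB l i = pvCloseB l (i + 1) := pvCloseB_step l i h hq
    have hgd : l.getD i ' ' = '\\' := by rw [List.getD_eq_getElem l ' ' h]; exact hbs
    have hcnt_i : pvCnt l i = pvCnt l (i - 1) + 1 := by
      conv_lhs => rw [pvCnt]
      rw [if_pos ⟨h1, hgd⟩]
    by_cases hx : i + 1 < l.length
    · by_cases hq2 : l[i + 1] = '"'
      · have hodd : pvRunB l (i + 1) 0 % 2 = 1 := by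
          rw [pvRunB_eq]
          simp only [Nat.add_sub_cancel, Nat.sub_zero, Nat.zero_add]
          rw [hcnt_i]
          omega
        have hstep2 : pvCloseB l (i + 1) = pvCloseB l (i + 2) := by
          rw [pvCloseB_quote l (i + 1) hx hq2, if_neg (by omega)]
        have hev2 : pvCnt l (i + 2 - 1) % 2 = 0 := by
          have hz : pvCnt l (i + 1) = 0 := by
            rw [pvCnt, if_neg]
            rintro ⟨-, hc⟩
            rw [List.getD_eq_getElem l ' ' hx, hq2] at hc
            exact absurd hc (by decide)
          have h21 : i + 2 - 1 = i + 1 := by omega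
          rw [h21, hz]
        rw [hstep, hstep2, hscan]
        exact ih (by omega) hev2
      · have hstep2 : pvCloseB l (i + 1) = pvCloseB l (i + 2) := pvCloseB_step l (i + 1) hx hq2
        have hev2 : pvCnt l (i + 2 - 1) % 2 = 0 := by
          by_cases hb2 : l[i + 1] = '\\'
          · have : pvCnt l (i + 1) = pvCnt l i + 1 := by
              conv_lhs => rw [pvCnt]
              rw [if_pos ⟨by omega, by rw [List.getD_eq_getElem l ' ' hx]; exact hb2⟩,
                Nat.succ_sub_one]
            have h21 : i + 2 - 1 = i + 1 := by omega
            rw [h21, this, hcnt_i]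
            omega
          · have : pvCnt l (i + 1) = 0 := by
              rw [pvCnt, if_neg]
              rintro ⟨-, hc⟩
              rw [List.getD_eq_getElem l ' ' hx] at hc
              exact hb2 hc
            have h21 : i + 2 - 1 = i + 1 := by omega
            rw [h21, this]
        rw [hstep, hstep2, hscan]
        exact ih (by omega) hev2
    · have hclose : pvCloseB l (i + 1) = none := pvCloseB_none l (i + 1) (by omega)
      have hscan2 : pvScanA l (i + 2) = i + 2 := by rw [pvScanA, dif_neg (by omega)]
      rw [hstep, hclose, hscan, hscan2, if_neg (by omega)]
  | case3 i h hq hbs ih =>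
    intro h1 hev
    have hscan : pvScanA l i = pvScanA l (i + 1) := by
      rw [pvScanA, dif_pos h, if_neg hq, if_neg hbs]
    have hstep : pvCloseB l i = pvCloseB l (i + 1) := pvCloseB_step l i h hq
    have hev2 : pvCnt l (i + 1 - 1) % 2 = 0 := by
      have : pvCnt l i = 0 := by
        rw [pvCnt, if_neg]
        rintro ⟨-, hc⟩
        rw [List.getD_eq_getElem l ' ' h] at hc
        exact hbs hc
      have h11 : i + 1 - 1 = i := by omega
      rw [h11, this]
    rw [hstep, hscan]
    exact ih (by omega) hev2
  | case4 i h =>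
    intro h1 hev
    have hscan : pvScanA l i = i := by rw [pvScanA, dif_neg h]
    rw [pvCloseB_none l i (by omega), hscan, if_neg (by omega)]

theorem pv_nodisp_eq (r : List Char) :
    pvNodispA r =
      (if PySem.Chars.find r ['@'] = -1 then ((none, none) : Option String × Option Int)
       else
        let a := PySem.Chars.find r ['@']
        let f1 := PySem.Chars.findFrom r [' '] (a + 1) none
        let f2 := PySem.Chars.findFrom r [','] (a + 1) none
        let stops := (if f1 = -1 then [] else [f1]) ++ (if f2 = -1 then [] else [f2])
        let endI : Int := (match PySem.List.min? stops id with
          | some m => m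
          | none => (r.length : Int))
        let part0 := PySem.Chars.strip (PySem.List.slice r none (some endI))
        let part1 := if PySem.Chars.startswith part0 ['<'] then part0.drop 1 else part0
        let part2 := if PySem.Chars.endswith part1 ['>'] then part1.dropLast else part1
        (some (String.ofList part2), some endI)) := by
  have hno : ∀ (n : Nat), ¬((n : Int) = -1) := fun n => by omega
  have hno2 : ∀ (n m : Nat), ¬(((n : Nat) : Int) + ((m : Nat) : Int) = -1) := fun n m => by omega
  have hno3 : ∀ (n m : Nat), ¬(((n : Nat) : Int) + 1 + ((m : Nat) : Int) = -1) := fun n m => by omega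
  by_cases hat : '@' ∈ r
  · have htrue : PySem.Chars.isIn ['@'] r = true := by
      rw [PySem.Chars.isIn_iff_infix, pv_infix_singleton]; exact hat
    have hfind : PySem.Chars.find r ['@'] = ((r.findIdx (· == '@') : Nat) : Int) := pv_find_mem hat
    have halen : r.findIdx (· == '@') < r.length := List.findIdx_lt_length.mpr ⟨'@', hat, by simp⟩
    set a := r.findIdx (· == '@') with ha
    have hk : a + 1 ≤ r.length := by omega
    have hcast : ((a : Int) + 1) = (((a + 1 : Nat)) : Int) := by push_cast; ring
    unfold pvNodispA
    rw [if_neg (by simp [htrue]), if_neg (by rw [hfind]; omega)]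
    simp only [hfind, Int.toNat_natCast, pv_scanA_end, hcast,
      PySem.Chars.findFrom_natCast r [' '] (a + 1) hk,
      PySem.Chars.findFrom_natCast r [','] (a + 1) hk]
    have hd1le : (r.drop (a + 1)).findIdx (· == ' ') ≤ (r.drop (a + 1)).length :=
      List.findIdx_le_length
    have hd2le : (r.drop (a + 1)).findIdx (· == ',') ≤ (r.drop (a + 1)).length :=
      List.findIdx_le_length
    by_cases h1m : ' ' ∈ r.drop (a + 1) <;> by_cases h2m : ',' ∈ r.drop (a + 1)
    · -- both stop characters occur after the '@'
      simp only [pv_find_mem h1m, pv_find_mem h2m, pv_findIdx_or]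
      rcases Nat.lt_or_ge ((r.drop (a + 1)).findIdx (· == ','))
        ((r.drop (a + 1)).findIdx (· == ' ')) with hcmp | hcmp
      · have hmin : min ((r.drop (a + 1)).findIdx (· == ' '))
            ((r.drop (a + 1)).findIdx (· == ',')) = (r.drop (a + 1)).findIdx (· == ',') := by
          omega
        have hlt : (((a + 1 : Nat)) : Int) + (((r.drop (a + 1)).findIdx (· == ',') : Nat) : Int) <
            (((a + 1 : Nat)) : Int) + (((r.drop (a + 1)).findIdx (· == ' ') : Nat) : Int) := by
          push_cast; omega
        simp only [PySem.List.min?, List.singleton_append, List.foldl_cons, List.foldl_nil,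
          id_eq, hno, hno2, hno3, hmin, if_false, List.append_nil, List.nil_append]
        rw [if_pos hlt]
        simp [pv_startswith_one, pv_endswith_one]
      · have hmin : min ((r.drop (a + 1)).findIdx (· == ' '))
            ((r.drop (a + 1)).findIdx (· == ',')) = (r.drop (a + 1)).findIdx (· == ' ') := by
          omega
        have hge : ¬((((a + 1 : Nat)) : Int) + (((r.drop (a + 1)).findIdx (· == ',') : Nat) : Int) <
            (((a + 1 : Nat)) : Int) + (((r.drop (a + 1)).findIdx (· == ' ') : Nat) : Int)) := by
          push_cast; omega
        simp only [PySem.List.min?, List.singleton_append, List.foldl_cons, List.foldl_nil,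
          id_eq, hno, hno2, hno3, hmin, if_false, List.append_nil, List.nil_append]
        rw [if_neg hge]
        simp [pv_startswith_one, pv_endswith_one]
    · -- only ' ' occurs
      have hd2 : (r.drop (a + 1)).findIdx (· == ',') = (r.drop (a + 1)).length := by
        rw [List.findIdx_eq_length]
        intro x hx
        simp only [beq_eq_false_iff_ne]
        rintro rfl; exact h2m hx
      have hmin : min ((r.drop (a + 1)).findIdx (· == ' ')) ((r.drop (a + 1)).length) =
          (r.drop (a + 1)).findIdx (· == ' ') := Nat.min_eq_left hd1le
      simp only [pv_find_mem h1m, pv_find_neg h2m, pv_findIdx_or, hd2]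
      simp only [PySem.List.min?, List.foldl_cons, List.foldl_nil, hno, hno2, hno3, hmin,
        eq_self_iff_true, if_true, if_false, List.append_nil, List.nil_append]
      simp [pv_startswith_one, pv_endswith_one]
    · -- only ',' occurs
      have hd1 : (r.drop (a + 1)).findIdx (· == ' ') = (r.drop (a + 1)).length := by
        rw [List.findIdx_eq_length]
        intro x hx
        simp only [beq_eq_false_iff_ne]
        rintro rfl; exact h1m hx
      have hmin : min ((r.drop (a + 1)).length) ((r.drop (a + 1)).findIdx (· == ',')) =
          (r.drop (a + 1)).findIdx (· == ',') := Nat.min_eq_right hd2le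
      simp only [pv_find_neg h1m, pv_find_mem h2m, pv_findIdx_or, hd1]
      simp only [PySem.List.min?, List.foldl_cons, List.foldl_nil, hno, hno2, hno3, hmin,
        eq_self_iff_true, if_true, if_false, List.append_nil, List.nil_append]
      simp [pv_startswith_one, pv_endswith_one]
    · -- neither occurs: the scan runs to the end of the string
      have hd1 : (r.drop (a + 1)).findIdx (· == ' ') = (r.drop (a + 1)).length := by
        rw [List.findIdx_eq_length]
        intro x hx
        simp only [beq_eq_false_iff_ne]
        rintro rfl; exact h1m hx
      have hd2 : (r.drop (a + 1)).findIdx (· == ',') = (r.drop (a + 1)).length := by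
        rw [List.findIdx_eq_length]
        intro x hx
        simp only [beq_eq_false_iff_ne]
        rintro rfl; exact h2m hx
      have hZ : ((r.length : Nat) : Int) = ((a : Nat) : Int) + 1 + (((r.drop (a + 1)).length : Nat) : Int) := by
        rw [List.length_drop]
        push_cast
        omega
      simp only [pv_find_neg h1m, pv_find_neg h2m, pv_findIdx_or, hd1, hd2, Nat.min_self]
      simp only [PySem.List.min?, List.foldl_nil, eq_self_iff_true, if_true, List.append_nil]
      simp [hZ, pv_startswith_one, pv_endswith_one]
  · have h2 : PySem.Chars.find r ['@'] = -1 := pv_find_neg hat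
    have h1 : PySem.Chars.isIn ['@'] r = false := by
      rw [PySem.Chars.isIn_eq_false_iff, pv_infix_singleton]
      exact hat
    unfold pvNodispA
    rw [if_pos h1, if_pos h2]

theorem pv_main (addr_str : String) : get_first_pr_from_quoted addr_str = get_first_pr_from_quoted_alt addr_str := by
  unfold get_first_pr_from_quoted get_first_pr_from_quoted_alt
  generalize addr_str.toList = l
  cases l with
  | nil => simp [PySem.List.pyGet?_zero, pv_startswith_one]
  | cons c t =>
    by_cases hc : c = '"'
    · subst hc
      set l := '"' :: t with hl
      have hsw : PySem.Chars.startswith l ['"'] = true := by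
        rw [pv_startswith_one]; constructor <;> simp [hl]
      have hA : ¬(l.length ≤ 0 ∨ PySem.List.pyGet? l 0 ≠ some '"') := by
        rw [PySem.List.pyGet?_zero]
        simp [hl]
      rw [if_neg hA, if_neg (show ¬(PySem.Chars.startswith l ['"'] = false) by simp [hsw])]
      simp only []
      have hcnt0 : pvCnt l (1 - 1) % 2 = 0 := by
        rw [pvCnt, if_neg (by rintro ⟨h, -⟩; omega)]
      have hclose := pv_scan_close l 1 (le_refl 1) hcnt0
      by_cases hlen : l.length ≤ pvScanA l 1
      · have hge : ¬(pvScanA l 1 < l.length) := by omega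
        have hnone : pvCloseB l 1 = none := by rw [hclose, if_neg hge]
        rw [if_pos hlen, hnone]
      · have hlt : pvScanA l 1 < l.length := by omega
        have hsome : pvCloseB l 1 = some (pvScanA l 1) := by rw [hclose, if_pos hlt]
        rw [if_neg hlen, hsome]
        have hcast : ((pvScanA l 1 : Int) + 1) = (((pvScanA l 1 + 1 : Nat)) : Int) := by
          push_cast; ring
        simp only [hcast, PySem.List.slice_from_natCast, pv_nodisp_eq]
        by_cases hfind : PySem.Chars.find (l.drop (pvScanA l 1 + 1)) ['@'] = -1
        · simp [hfind]
        · simp [hfind]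
    · have hsw : PySem.Chars.startswith (c :: t) ['"'] = false := by
        rw [Bool.eq_false_iff, ne_eq, pv_startswith_one]
        simp [hc]
      have hA : (c :: t).length ≤ 0 ∨ PySem.List.pyGet? (c :: t) 0 ≠ some '"' := by
        right
        rw [PySem.List.pyGet?_zero]
        simp [hc]
      rw [if_pos hA, if_pos (by simp [hsw])]

-- ===== VERDICT (by name: the statement is the Claim_ definition above) =====
theorem get_first_pr_from_quoted_spec : Claim_equal_get_first_pr_from_quoted := by
  intro s _
  unfold Spec_get_first_pr_from_quoted
  exact pv_main s
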